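-- pv_equiv track=rewrite | github.com/nikfuzz/DataStructures_Algorithms | graphs/Damaged_Roads.py | solve
-- ===== SOURCE A (Python) =====
-- def solve(a, b):
--     v = []
--     for i in range(len(a)):
--         v.append((a[i],1))
--
--     for i in range(len(b)):
--         v.append((b[i],0))
--
--     v.sort()
--     n = len(a)+1
--     m = len(b)+1
--     cost = 0
--     for u in v:
--         if u[1] == 0:
--             cost += (u[0]*n)
--             m -= 1
--         else:
--             cost += (u[0]*m)
--             n -= 1
--     return cost%(10**9 + 7)
-- ===== SOURCE B (Python) =====
-- def solve(a, b):
--     sa = sorted(a)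
--     sb = sorted(b)
--     n = len(a) + 1
--     m = len(b) + 1
--     cost = 0
--     i = j = 0
--     while i < len(sa) or j < len(sb):
--         if j < len(sb) and (i >= len(sa) or sb[j] <= sa[i]):
--             cost += sb[j] * n
--             m -= 1
--             j += 1
--         else:
--             cost += sa[i] * m
--             n -= 1
--             i += 1
--     return cost % (10**9 + 7)
-- ===== Notes on version B (the rewrite author's own statement) =====
-- stated objective: alternative
-- what changed: Instead of tagging every weight, concatenating, and sorting one combined tuple list, B sorts the two lists separately and merges them with two pointers (ties taken from b first, matching the (w,0)<(w,1) tuple tie-break), accumulating the cost during the merge.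
import Mathlib
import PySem

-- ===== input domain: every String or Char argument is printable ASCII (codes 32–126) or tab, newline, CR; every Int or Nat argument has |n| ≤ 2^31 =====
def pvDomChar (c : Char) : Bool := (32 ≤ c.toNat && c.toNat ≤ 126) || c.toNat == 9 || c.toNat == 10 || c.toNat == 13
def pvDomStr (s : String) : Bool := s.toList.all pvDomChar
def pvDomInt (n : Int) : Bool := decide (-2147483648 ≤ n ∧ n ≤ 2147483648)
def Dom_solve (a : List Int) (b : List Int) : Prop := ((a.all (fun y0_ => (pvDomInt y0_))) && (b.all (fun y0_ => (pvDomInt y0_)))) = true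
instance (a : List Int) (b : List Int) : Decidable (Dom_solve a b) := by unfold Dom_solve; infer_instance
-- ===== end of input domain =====

-- B replaces A's tag-concatenate-and-sort of one combined tuple list by two separate sorts
-- merged with two pointers (equal weights consumed from b first); an alternative of the same cost.

-- ===== PORT A =====
def solve (a : List Int) (b : List Int) : Int :=
  -- v = [(a[i],1)…] ++ [(b[i],0)…], built by the two append loops
  let v0 : List (Int × Int) := a.foldl (fun acc x => acc ++ [(x, (1 : Int))]) []
  let v1 : List (Int × Int) := b.foldl (fun acc x => acc ++ [(x, (0 : Int))]) v0
  -- v.sort() on tuples = lexicographic sort on (fst, snd)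
  let v : List (Int × Int) := PySem.List.sorted2 v1 Prod.fst Prod.snd
  -- the loop over v with state (n, m, cost)
  let s : Int × Int × Int := v.foldl
    (fun (s : Int × Int × Int) (u : Int × Int) =>
      if u.2 = 0 then (s.1, s.2.1 - 1, s.2.2 + u.1 * s.1)
      else (s.1 - 1, s.2.1, s.2.2 + u.1 * s.2.1))
    (((a.length : Int) + 1), ((b.length : Int) + 1), 0)
  PySem.Int.mod s.2.2 (10 ^ 9 + 7)

-- ===== PORT B =====
-- B's while loop over indices i, j: structural recursion on the unconsumed suffixes of sa, sb
def mergeCost : List Int → List Int → Int → Int → Int → Int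
  | [], [], _, _, cost => cost
  | [], y :: ys, n, m, cost => mergeCost [] ys n (m - 1) (cost + y * n)
  | x :: xs, [], n, m, cost => mergeCost xs [] (n - 1) m (cost + x * m)
  | x :: xs, y :: ys, n, m, cost =>
      if y ≤ x then mergeCost (x :: xs) ys n (m - 1) (cost + y * n)
      else mergeCost xs (y :: ys) (n - 1) m (cost + x * m)
termination_by sa sb _ _ _ => sa.length + sb.length

def solve_alt (a : List Int) (b : List Int) : Int :=
  let sa := PySem.List.sorted a (fun x => x)
  let sb := PySem.List.sorted b (fun x => x)
  PySem.Int.mod (mergeCost sa sb ((a.length : Int) + 1) ((b.length : Int) + 1) 0) (10 ^ 9 + 7)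

-- ===== PRECONDITION & SPEC =====
def Spec_solve (a : List Int) (b : List Int) (out : Int) : Prop := out = solve_alt a b
instance (a : List Int) (b : List Int) (out : Int) : Decidable (Spec_solve a b out) := by unfold Spec_solve; infer_instance

-- ===== CLAIM (what is proved, stated in full; the proofs are below) =====
def Claim_equal_solve : Prop := ∀ (a : List Int) (b : List Int), Dom_solve a b → Spec_solve a b (solve a b)

-- ===== LEMMAS AND PROOFS =====

-- the tagged merge of the two sorted lists: the order in which B consumes the elements
def mlist : List Int → List Int → List (Int × Int)
  | [], [] => []
  | [], y :: ys => (y, 0) :: mlist [] ys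
  | x :: xs, [] => (x, 1) :: mlist xs []
  | x :: xs, y :: ys =>
      if y ≤ x then (y, 0) :: mlist (x :: xs) ys
      else (x, 1) :: mlist xs (y :: ys)
termination_by sa sb => sa.length + sb.length

-- A's loop over the merged order computes exactly B's merge loop
theorem foldl_mlist_eq_mergeCost (sa sb : List Int) (n m c : Int) :
    ((mlist sa sb).foldl
      (fun (s : Int × Int × Int) (u : Int × Int) =>
        if u.2 = 0 then (s.1, s.2.1 - 1, s.2.2 + u.1 * s.1)
        else (s.1 - 1, s.2.1, s.2.2 + u.1 * s.2.1)) (n, m, c)).2.2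
      = mergeCost sa sb n m c := by
  fun_induction mlist sa sb generalizing n m c with
  | case1 => simp [mergeCost]
  | case2 y ys ih => simp [mergeCost, ih]
  | case3 x xs ih => simp [mergeCost, ih]
  | case4 x xs y ys hle ih => simp [mergeCost, hle, ih]
  | case5 x xs y ys hle ih => simp [mergeCost, hle, ih]

theorem mlist_perm (sa sb : List Int) :
    (mlist sa sb).Perm (sa.map (fun x => (x, (1 : Int))) ++ sb.map (fun y => (y, (0 : Int)))) := by
  fun_induction mlist sa sb with
  | case1 => simp
  | case2 y ys ih =>
      simpa [mlist] using ih.cons ((y, (0 : Int)))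
  | case3 x xs ih =>
      simpa [mlist] using ih.cons ((x, (1 : Int)))
  | case4 x xs y ys hle ih =>
      simp only [List.map_cons]
      exact (ih.cons ((y, (0 : Int)))).trans List.perm_middle.symm
  | case5 x xs y ys hle ih =>
      simpa [mlist, hle] using ih.cons ((x, (1 : Int)))

theorem mem_mlist (sa sb : List Int) (u : Int × Int) (hu : u ∈ mlist sa sb) :
    (u.2 = 1 ∧ u.1 ∈ sa) ∨ (u.2 = 0 ∧ u.1 ∈ sb) := by
  have := (mlist_perm sa sb).mem_iff.mp hu
  rcases List.mem_append.mp this with h | h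
  · obtain ⟨x, hx, rfl⟩ := List.mem_map.mp h; exact Or.inl ⟨rfl, hx⟩
  · obtain ⟨y, hy, rfl⟩ := List.mem_map.mp h; exact Or.inr ⟨rfl, hy⟩

-- merging two non-decreasing lists, b-side first on ties, is non-decreasing in the tuple (lex) order
theorem mlist_pairwise (sa sb : List Int) :
    sa.Pairwise (· ≤ ·) → sb.Pairwise (· ≤ ·) →
    (mlist sa sb).Pairwise (fun u w => toLex u ≤ toLex w) := by
  fun_induction mlist sa sb with
  | case1 => intro _ _; simp
  | case2 y ys ih =>
      intro ha hb
      rw [List.pairwise_cons] at hb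
      refine List.Pairwise.cons ?_ (ih ha hb.2)
      intro u hu
      rcases mem_mlist _ _ _ hu with ⟨_, h⟩ | ⟨h2, h1⟩
      · simp at h
      · rcases (hb.1 u.1 h1).lt_or_eq with hlt | heq
        · exact Prod.Lex.toLex_le_toLex.mpr (Or.inl hlt)
        · exact Prod.Lex.toLex_le_toLex.mpr (Or.inr ⟨heq, by rw [h2]⟩)
  | case3 x xs ih =>
      intro ha hb
      rw [List.pairwise_cons] at ha
      refine List.Pairwise.cons ?_ (ih ha.2 hb)
      intro u hu
      rcases mem_mlist _ _ _ hu with ⟨h2, h1⟩ | ⟨_, h⟩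
      · rcases (ha.1 u.1 h1).lt_or_eq with hlt | heq
        · exact Prod.Lex.toLex_le_toLex.mpr (Or.inl hlt)
        · exact Prod.Lex.toLex_le_toLex.mpr (Or.inr ⟨heq, by rw [h2]⟩)
      · simp at h
  | case4 x xs y ys hle ih =>
      intro ha hb
      rw [List.pairwise_cons] at hb
      refine List.Pairwise.cons ?_ (ih ha hb.2)
      intro u hu
      rcases mem_mlist _ _ _ hu with ⟨h2, h1⟩ | ⟨h2, h1⟩
      · have hx : x ≤ u.1 := by
          rcases List.mem_cons.mp h1 with he | h
          · exact he.ge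
          · exact (List.pairwise_cons.mp ha).1 u.1 h
        rcases (le_trans hle hx).lt_or_eq with hlt | heq
        · exact Prod.Lex.toLex_le_toLex.mpr (Or.inl hlt)
        · exact Prod.Lex.toLex_le_toLex.mpr (Or.inr ⟨heq, by rw [h2]; norm_num⟩)
      · rcases (hb.1 u.1 h1).lt_or_eq with hlt | heq
        · exact Prod.Lex.toLex_le_toLex.mpr (Or.inl hlt)
        · exact Prod.Lex.toLex_le_toLex.mpr (Or.inr ⟨heq, by rw [h2]⟩)
  | case5 x xs y ys hle ih =>
      intro ha hb
      rw [List.pairwise_cons] at ha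
      refine List.Pairwise.cons ?_ (ih ha.2 hb)
      intro u hu
      rcases mem_mlist _ _ _ hu with ⟨h2, h1⟩ | ⟨h2, h1⟩
      · rcases (ha.1 u.1 h1).lt_or_eq with hlt | heq
        · exact Prod.Lex.toLex_le_toLex.mpr (Or.inl hlt)
        · exact Prod.Lex.toLex_le_toLex.mpr (Or.inr ⟨heq, by rw [h2]⟩)
      · have hy : y ≤ u.1 := by
          rcases List.mem_cons.mp h1 with he | h
          · exact he.ge
          · exact (List.pairwise_cons.mp hb).1 u.1 h
        exact Prod.Lex.toLex_le_toLex.mpr (Or.inl (lt_of_lt_of_le (not_le.mp hle) hy))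

-- Python's tuple sort is the sort by the lexicographic key
theorem sorted2_eq_sorted_lex (v : List (Int × Int)) :
    PySem.List.sorted2 v Prod.fst Prod.snd = PySem.List.sorted v (fun p => toLex p) := by
  simp only [PySem.List.sorted2, PySem.List.sorted]
  congr 1
  funext acc x
  congr 1
  funext p q
  simp only [Bool.false_eq_true, if_false]
  by_cases h1 : p.1 < q.1
  · simp [h1, Prod.Lex.toLex_lt_toLex]
  · by_cases h2 : q.1 < p.1
    · simp [h1, h2, Prod.Lex.toLex_lt_toLex, ne_of_gt h2]
    · have heq : p.1 = q.1 := le_antisymm (not_lt.mp h2) (not_lt.mp h1)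
      simp [heq, Prod.Lex.toLex_lt_toLex]

-- the sorted combined tagged list IS the merge of the two separately sorted lists
theorem sorted_lex_eq_mlist (a b : List Int) :
    PySem.List.sorted (a.map (fun x => (x, (1 : Int))) ++ b.map (fun y => (y, (0 : Int))))
      (fun p => toLex p)
    = mlist (PySem.List.sorted a (fun x => x)) (PySem.List.sorted b (fun x => x)) := by
  apply PySem.List.eq_of_perm_of_pairwise_le_of_injective (fun p => toLex p) toLex.injective
  · refine (PySem.List.sorted_perm _ _ _).trans ?_
    have hmaps : ((PySem.List.sorted a (fun x => x)).map (fun x => (x, (1 : Int))) ++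
        (PySem.List.sorted b (fun x => x)).map (fun y => (y, (0 : Int)))).Perm
        (a.map (fun x => (x, (1 : Int))) ++ b.map (fun y => (y, (0 : Int)))) :=
      List.Perm.append ((PySem.List.sorted_perm a _ false).map _)
        ((PySem.List.sorted_perm b _ false).map _)
    exact ((mlist_perm _ _).trans hmaps).symm
  · exact PySem.List.sorted_pairwise _ _
  · exact mlist_pairwise _ _ (PySem.List.sorted_pairwise a (fun x => x))
      (PySem.List.sorted_pairwise b (fun x => x))

-- ===== VERDICT (by name: the statement is the Claim_ definition above) =====
theorem solve_spec : Claim_equal_solve := by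
  unfold Claim_equal_solve
  intro a b _
  unfold Spec_solve
  simp only [solve, solve_alt, PySem.List.foldl_append_singleton_eq_map, List.nil_append]
  rw [sorted2_eq_sorted_lex, sorted_lex_eq_mlist, foldl_mlist_eq_mergeCost]
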